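-- pv_equiv track=rewrite | github.com/Alexvargame/Python_tasks | pythonist/same_length.py | same_length
-- ===== SOURCE A (Python) =====
-- def same_length(n):
--
--     if len(str(n))%2==0 and (set(list(str(n)[:int(len(str(n))/2)]))& set(list(str(n)[int(len(str(n))/2):]))==set()):
--         return True
--
--     else:
--         for i in str(n):
--             if i=='1':
--                 pos=str(n).find('0')
--                 if str(n)[pos:].find('1')==pos:
--                     return same_length(int(str(n)[pos*2:]))
--     return False
-- ===== SOURCE B (Python) =====
-- def same_length(n):
--     while True:
--         s = str(n)
--         half = len(s) // 2
--         if len(s) % 2 == 0 and all(c not in s[half:] for c in s[:half]):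
--             return True
--         if '1' not in s:
--             return False
--         pos = s.find('0')
--         if s[pos:].find('1') != pos:
--             return False
--         n = int(s[pos * 2:])
-- ===== Notes on version B (the rewrite author's own statement) =====
-- stated objective: simpler
-- what changed: B replaces A's head recursion plus an inner for-loop over all digits (whose per-'1' body is independent of the loop variable) by a single flat while-True loop with one '1'-membership test and an all(...) disjointness scan instead of set intersection.
import Mathlib
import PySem

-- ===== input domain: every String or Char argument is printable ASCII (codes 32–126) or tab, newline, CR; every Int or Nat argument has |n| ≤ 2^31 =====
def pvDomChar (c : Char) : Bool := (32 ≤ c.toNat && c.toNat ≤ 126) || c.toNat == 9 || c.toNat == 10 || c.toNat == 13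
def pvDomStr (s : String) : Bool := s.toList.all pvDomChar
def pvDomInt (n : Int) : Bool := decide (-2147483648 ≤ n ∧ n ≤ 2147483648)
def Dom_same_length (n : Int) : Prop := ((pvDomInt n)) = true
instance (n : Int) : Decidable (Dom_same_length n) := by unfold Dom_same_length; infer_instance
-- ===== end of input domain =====

-- B replaces A's head recursion plus an inner for-loop over the digits (whose per-'1' test is
-- independent of the loop variable) by a single `while True` loop with one membership test;
-- objective: simpler. Both ports use a fuel counter only to make the shared recursion total in
-- Lean; the fuel is never exhausted on the |n| ≤ 2^31 domain.

-- ===== PORT A =====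
-- the `for i in str(n): if i=='1': …` loop; `recv` is the recursive call `same_length` at lower fuel
def pvLoopA (s : List Char) (recv : Int → Bool) : List Char → Bool
  | [] => false
  | c :: rest =>
    if c == '1' then
      let pos := PySem.Chars.find s ['0']
      if PySem.Chars.find (PySem.List.slice s (some pos) none) ['1'] == pos then
        -- int(str(n)[pos*2:]); the slice is never empty when this branch is reached, guard only for totality
        match PySem.Int.ofChars? (PySem.List.slice s (some (pos * 2)) none) with
        | some m => recv m
        | none => false
      else pvLoopA s recv rest
    else pvLoopA s recv rest

def pvSameA : Nat → Int → Bool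
  | 0, _ => false
  | fuel + 1, n =>
    let s := PySem.Int.toChars n
    -- int(len(str(n))/2) is evaluated only when the length is even, so Nat division is exact
    if s.length % 2 == 0
        && PySem.Set.equal
             (PySem.Set.inter (PySem.Set.ofList (PySem.List.slice s none (some ((s.length / 2 : Nat) : Int))))
                              (PySem.Set.ofList (PySem.List.slice s (some ((s.length / 2 : Nat) : Int)) none)))
             PySem.Set.empty then
      true
    else
      pvLoopA s (pvSameA fuel) s

def same_length (n : Int) : Bool := pvSameA 64 n

-- ===== PORT B =====
def pvSameB : Nat → Int → Bool
  | 0, _ => false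
  | fuel + 1, n =>
    let s := PySem.Int.toChars n
    let half : Nat := s.length / 2
    if s.length % 2 == 0
        && (PySem.List.slice s none (some (half : Int))).all
             (fun c => !(PySem.Chars.isIn [c] (PySem.List.slice s (some (half : Int)) none))) then
      true
    else if !(PySem.Chars.isIn ['1'] s) then
      false
    else
      let pos := PySem.Chars.find s ['0']
      if PySem.Chars.find (PySem.List.slice s (some pos) none) ['1'] != pos then
        false
      else
        -- int(s[pos*2:]); the slice is never empty when this branch is reached, guard only for totality
        match PySem.Int.ofChars? (PySem.List.slice s (some (pos * 2)) none) with
        | some m => pvSameB fuel m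
        | none => false

def same_length_alt (n : Int) : Bool := pvSameB 64 n

-- ===== PRECONDITION & SPEC =====
def Spec_same_length (n : Int) (out : Bool) : Prop := out = same_length_alt n
instance (n : Int) (out : Bool) : Decidable (Spec_same_length n out) := by unfold Spec_same_length; infer_instance

-- ===== CLAIM (what is proved, stated in full; the proofs are below) =====
def Claim_equal_same_length : Prop := ∀ (n : Int), Dom_same_length n → Spec_same_length n (same_length n)

-- ===== LEMMAS AND PROOFS =====

-- a one-character substring test is an element test
theorem pv_isIn_singleton (c : Char) (b : List Char) :
    PySem.Chars.isIn [c] b = b.contains c := by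
  by_cases h : c ∈ b
  · rw [(PySem.Chars.isIn_iff_infix [c] b).2 ((List.singleton_infix_iff c b).mpr h)]
    simp [h]
  · have : ¬ ([c] <:+: b) := fun hin => h ((List.singleton_infix_iff c b).mp hin)
    rw [(PySem.Chars.isIn_eq_false_iff [c] b).2 this]
    simp [h]

-- A's emptiness test of the set intersection equals B's all-not-in scan
theorem pv_disjoint_eq (a b : List Char) :
    PySem.Set.equal (PySem.Set.inter (PySem.Set.ofList a) (PySem.Set.ofList b)) PySem.Set.empty
      = a.all (fun c => !(PySem.Chars.isIn [c] b)) := by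
  by_cases h : ∀ c ∈ a, c ∉ b
  · have h1 : PySem.Set.inter (PySem.Set.ofList a) (PySem.Set.ofList b) = [] := by
      apply List.eq_nil_iff_forall_not_mem.2
      intro x hx
      have hm := (PySem.Set.mem_inter _ _ x).1 hx
      exact h x ((PySem.Set.mem_ofList _ _).1 hm.1) ((PySem.Set.mem_ofList _ _).1 hm.2)
    rw [h1]
    have h2 : a.all (fun c => !(PySem.Chars.isIn [c] b)) = true := by
      simp only [List.all_eq_true, Bool.not_eq_eq_eq_not, Bool.not_true]
      intro c hc
      rw [pv_isIn_singleton]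
      simpa using h c hc
    rw [h2]; rfl
  · push Not at h
    obtain ⟨c, hca, hcb⟩ := h
    have h1 : PySem.Set.equal (PySem.Set.inter (PySem.Set.ofList a) (PySem.Set.ofList b)) PySem.Set.empty = false := by
      by_contra hne
      have he : PySem.Set.equal (PySem.Set.inter (PySem.Set.ofList a) (PySem.Set.ofList b)) PySem.Set.empty = true := by
        revert hne; cases PySem.Set.equal (PySem.Set.inter (PySem.Set.ofList a) (PySem.Set.ofList b)) PySem.Set.empty <;> simp
      have hcontra : ∀ x ∈ a, x ∉ b := by simpa [PySem.Set.equal] using he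
      exact hcontra c hca hcb
    rw [h1]
    have h2 : a.all (fun c => !(PySem.Chars.isIn [c] b)) = false := by
      apply List.all_eq_false.2
      refine ⟨c, hca, ?_⟩
      rw [pv_isIn_singleton]
      simp [hcb]
    rw [h2]

-- A's for-loop collapses: its per-'1' body does not depend on the loop variable
theorem pvLoopA_eq (s : List Char) (recv : Int → Bool) (cs : List Char) :
    pvLoopA s recv cs =
      if '1' ∈ cs then
        (let pos := PySem.Chars.find s ['0']
         if PySem.Chars.find (PySem.List.slice s (some pos) none) ['1'] == pos then
           match PySem.Int.ofChars? (PySem.List.slice s (some (pos * 2)) none) with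
           | some m => recv m
           | none => false
         else false)
      else false := by
  induction cs with
  | nil => simp [pvLoopA]
  | cons c rest ih =>
    by_cases hc : c = '1'
    · subst hc
      simp only [pvLoopA, List.mem_cons, true_or, beq_self_eq_true, if_true]
      split
      · rfl
      · rw [ih]
        by_cases hr : '1' ∈ rest <;> simp_all
    · have : (c == '1') = false := by simpa using hc
      simp only [pvLoopA, this, Bool.false_eq_true, if_false, ih]
      by_cases hr : '1' ∈ rest
      · simp [hr, List.mem_cons]
      · have hnc : '1' ∉ c :: rest := by
          simp only [List.mem_cons]
          rintro (h | h)
          · exact hc h.symm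
          · exact hr h
        simp [hr, hnc]

theorem pvSame_eq (fuel : Nat) (n : Int) : pvSameA fuel n = pvSameB fuel n := by
  induction fuel generalizing n with
  | zero => rfl
  | succ f ih =>
    show pvSameA (f + 1) n = pvSameB (f + 1) n
    rw [pvSameA, pvSameB]
    simp only [pv_disjoint_eq, pvLoopA_eq]
    set s := PySem.Int.toChars n with hs
    split
    · rfl
    · rw [pv_isIn_singleton]
      by_cases h1 : '1' ∈ s
      · have hct : s.contains '1' = true := by simp [h1]
        simp only [h1, if_pos, hct, Bool.not_true, Bool.false_eq_true, if_false]
        set pos := PySem.Chars.find s ['0']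
        by_cases h2 : PySem.Chars.find (PySem.List.slice s (some pos) none) ['1'] = pos
        · have hb : (PySem.Chars.find (PySem.List.slice s (some pos) none) ['1'] == pos) = true := by
            simpa using h2
          simp only [hb, bne, Bool.not_true, Bool.false_eq_true, if_false, if_true]
          cases PySem.Int.ofChars? (PySem.List.slice s (some (pos * 2)) none) with
          | none => rfl
          | some m => exact ih m
        · have hb : (PySem.Chars.find (PySem.List.slice s (some pos) none) ['1'] == pos) = false := by
            simpa using h2
          simp [hb, bne]
      · simp [h1]

-- ===== VERDICT (by name: the statement is the Claim_ definition above) =====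
theorem same_length_spec : Claim_equal_same_length := by
  intro n _
  show same_length n = same_length_alt n
  exact pvSame_eq 64 n
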